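-- pv_equiv track=rewrite | github.com/aadarshsingh191198/tag-visualiser | app.py | get_markup
-- ===== SOURCE A (Python) =====
-- def get_markup(sent,tags):
--     sent = sent.split()
--     tags = tags.split()
--     prev = None
--     markup = ""
--     for i in range(len(sent)):
--         if tags[i] != prev:
--             if prev and prev!='O':
--                 markup+= "</mark>"
--             if tags[i]!="O":
--                 markup += f' <mark data-entity="{tags[i]}">{sent[i]}'
--             else:
--                 markup += f' {sent[i]}'
--             prev = tags[i]
--         elif tags[i] == prev:
--             markup += f' {sent[i]}'
--     if prev != "O": markup+= "</mark>"
--     return markup.strip()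
-- ===== SOURCE B (Python) =====
-- def get_markup(sent, tags):
--     words = sent.split()
--     labels = tags.split()
--     n = len(words)
--     pieces = []
--     i = 0
--     while i < n:
--         tag = labels[i]
--         j = i + 1
--         while j < n and labels[j] == tag:
--             j += 1
--         text = " ".join(words[i:j])
--         if tag == "O":
--             pieces.append(" " + text)
--         else:
--             pieces.append(f' <mark data-entity="{tag}">{text}</mark>')
--         i = j
--     return "".join(pieces).strip()
-- ===== Notes on version B (the rewrite author's own statement) =====
-- stated objective: alternative
-- what changed: B replaces A's token-by-token state machine (prev tag, deferred </mark> close, per-token branches) by a run decomposition: a second index scans each maximal run of consecutive equal tags, each run is rendered as one self-contained piece (open tag, space-joined words, close) and the pieces are concatenated.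
-- intended difference: On whitespace-only sent (no tokens) A returns the stray '</mark>' left by its unconditional final close, while B returns '', the intended markup for an empty token list. — e.g. on get_markup("", ""): A returns "</mark>", B returns ""
import Mathlib
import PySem

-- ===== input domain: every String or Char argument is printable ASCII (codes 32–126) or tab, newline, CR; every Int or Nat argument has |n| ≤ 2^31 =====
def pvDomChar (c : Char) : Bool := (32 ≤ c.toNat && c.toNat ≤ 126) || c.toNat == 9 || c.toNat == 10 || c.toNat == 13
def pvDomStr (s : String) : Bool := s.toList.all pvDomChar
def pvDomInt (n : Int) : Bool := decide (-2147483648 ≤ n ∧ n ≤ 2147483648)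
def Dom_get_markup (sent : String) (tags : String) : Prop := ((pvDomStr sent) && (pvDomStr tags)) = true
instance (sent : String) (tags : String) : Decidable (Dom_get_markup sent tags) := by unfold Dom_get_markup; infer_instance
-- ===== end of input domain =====

-- B re-implements get_markup by scanning each run of consecutive equal tags with a second index
-- and rendering every run as one self-contained piece (alternative decomposition, same cost);
-- on whitespace-only `sent` B returns "" where A returns a stray "</mark>" (see D_get_markup).

-- ===== PORT A =====
def get_markup (sent : String) (tags : String) : String :=
  let sentL := PySem.Chars.split₀ sent.toList
  let tagsL := PySem.Chars.split₀ tags.toList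
  let st := (PySem.List.pyRange 0 (sentL.length : Int) 1).foldl
    (fun (st : Option (List Char) × List Char) i =>
      let ti := PySem.List.pyGetD tagsL i []
      if some ti ≠ st.1 then
        -- `if prev and prev != 'O'` : prev is truthy iff it is a nonempty string
        let m1 := if (match st.1 with
                      | some p => decide (p ≠ []) && decide (p ≠ ['O'])
                      | none => false) then st.2 ++ "</mark>".toList else st.2
        (some ti,
          if ti ≠ ['O'] then
            m1 ++ " <mark data-entity=\"".toList ++ ti ++ "\">".toList ++ PySem.List.pyGetD sentL i []
          else m1 ++ ' ' :: PySem.List.pyGetD sentL i [])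
      else (st.1, st.2 ++ ' ' :: PySem.List.pyGetD sentL i []))
    (none, [])
  String.ofList (PySem.Chars.strip (if st.1 ≠ some ['O'] then st.2 ++ "</mark>".toList else st.2))

-- ===== PORT B =====
-- inner `while j < n and labels[j] == tag: j += 1`, as a fuel-bounded loop (fuel n always suffices)
def pvRunEnd (labels : List (List Char)) (n : Nat) (tag : List Char) : Nat → Nat → Nat
  | 0, j => j
  | fuel + 1, j =>
    if j < n ∧ labels.getD j [] = tag then pvRunEnd labels n tag fuel (j + 1) else j


-- outer `while i < n: … pieces.append(piece); i = j`, fuel-bounded (i strictly increases each pass)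
def pvRender (words labels : List (List Char)) (n : Nat) : Nat → Nat → List (List Char)
  | 0, _ => []
  | fuel + 1, i =>
    if i < n then
      let tag := labels.getD i []
      let j := pvRunEnd labels n tag n (i + 1)
      let text := PySem.Chars.join [' '] (PySem.List.slice words (some (i : Int)) (some (j : Int)))
      (if tag = ['O'] then ' ' :: text
       else " <mark data-entity=\"".toList ++ tag ++ "\">".toList ++ text ++ "</mark>".toList)
        :: pvRender words labels n fuel j
    else []


def get_markup_alt (sent : String) (tags : String) : String :=
  let words := PySem.Chars.split₀ sent.toList
  let labels := PySem.Chars.split₀ tags.toList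
  String.ofList (PySem.Chars.strip (PySem.Chars.join [] (pvRender words labels words.length words.length 0)))

-- ===== PRECONDITION & SPEC =====
-- Pre_ excludes exactly the inputs where tags has fewer whitespace-split tokens than sent:
-- there Python A raises IndexError (and Python B raises too).
def Pre_get_markup (sent : String) (tags : String) : Prop :=
  (PySem.Chars.split₀ sent.toList).length ≤ (PySem.Chars.split₀ tags.toList).length
instance (sent : String) (tags : String) : Decidable (Pre_get_markup sent tags) := by
  unfold Pre_get_markup; infer_instance
def pvWitness_get_markup : String × String := ("John lives here", "B-PER O O")

-- On whitespace-only `sent` (no tokens at all) A returns the stray "</mark>" left by its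
-- unconditional final close, while B returns "", the intended markup for an empty token list.
def D_get_markup (sent : String) (tags : String) : Prop :=
  PySem.Chars.split₀ sent.toList = []
instance (sent : String) (tags : String) : Decidable (D_get_markup sent tags) := by
  unfold D_get_markup; infer_instance

def Spec_get_markup (sent : String) (tags : String) (out : String) : Prop :=
  ¬ D_get_markup sent tags → out = get_markup_alt sent tags
instance (sent : String) (tags : String) (out : String) : Decidable (Spec_get_markup sent tags out) := by
  unfold Spec_get_markup; infer_instance

def pvDiffWitness_get_markup : String × String := ("", "")
def pvDiffWitnessOut_get_markup : String × String := ("</mark>", "")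

-- ===== CLAIM (what is proved, stated in full; the proofs are below) =====
def Claim_unchanged_get_markup : Prop := ∀ (sent : String) (tags : String), Dom_get_markup sent tags → Pre_get_markup sent tags → Spec_get_markup sent tags (get_markup sent tags)
def Claim_changed_get_markup : Prop := Dom_get_markup (pvDiffWitness_get_markup.1) (pvDiffWitness_get_markup.2) ∧ Pre_get_markup (pvDiffWitness_get_markup.1) (pvDiffWitness_get_markup.2) ∧ D_get_markup (pvDiffWitness_get_markup.1) (pvDiffWitness_get_markup.2) ∧ get_markup (pvDiffWitness_get_markup.1) (pvDiffWitness_get_markup.2) = pvDiffWitnessOut_get_markup.1 ∧ get_markup_alt (pvDiffWitness_get_markup.1) (pvDiffWitness_get_markup.2) = pvDiffWitnessOut_get_markup.2 ∧ pvDiffWitnessOut_get_markup.1 ≠ pvDiffWitnessOut_get_markup.2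
def Claim_exact_get_markup : Prop := ∀ (sent : String) (tags : String), Dom_get_markup sent tags → Pre_get_markup sent tags → D_get_markup sent tags → get_markup sent tags ≠ get_markup_alt sent tags

-- ===== LEMMAS AND PROOFS =====
theorem pv_split₀_go_ne_nil : ∀ (s cur : List Char) (acc : List (List Char)),
    (∀ x ∈ acc, x ≠ []) → ∀ x ∈ PySem.Chars.split₀.go s cur acc, x ≠ [] := by
  intro s
  induction s with
  | nil =>
    intro cur acc hacc x hx
    simp only [PySem.Chars.split₀.go] at hx
    split at hx
    · exact hacc x (List.mem_reverse.mp hx)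
    · next h =>
      rcases List.mem_cons.mp (List.mem_reverse.mp hx) with h' | h'
      · subst h'
        simp [List.isEmpty_iff] at h
        simpa using h
      · exact hacc x h'
  | cons c rest ih =>
    intro cur acc hacc x hx
    simp only [PySem.Chars.split₀.go] at hx
    split at hx
    · split at hx
      · exact ih [] acc hacc x hx
      · next h =>
        refine ih [] _ ?_ x hx
        intro y hy
        rcases List.mem_cons.mp hy with h' | h'
        · simp [List.isEmpty_iff] at h; simpa [h'] using h
        · exact hacc y h'
    · exact ih (c :: cur) acc hacc x hx

theorem pv_split₀_ne_nil (s : List Char) : ∀ x ∈ PySem.Chars.split₀ s, x ≠ [] := by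
  intro x hx
  exact pv_split₀_go_ne_nil s [] [] (by simp) x hx


theorem pvRunEnd_ge (labels : List (List Char)) (n : Nat) (tag : List Char) :
    ∀ fuel j, j ≤ pvRunEnd labels n tag fuel j := by
  intro fuel
  induction fuel with
  | zero => intro j; simp [pvRunEnd]
  | succ f ih =>
    intro j
    simp only [pvRunEnd]
    split
    · exact le_trans (by omega) (ih (j + 1))
    · exact le_refl j

theorem pvRunEnd_le (labels : List (List Char)) (n : Nat) (tag : List Char) :
    ∀ fuel j, j ≤ n → pvRunEnd labels n tag fuel j ≤ n := by
  intro fuel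
  induction fuel with
  | zero => intro j h; simpa [pvRunEnd] using h
  | succ f ih =>
    intro j h
    simp only [pvRunEnd]
    split
    · next hc => exact ih (j + 1) (by omega)
    · exact h

theorem pvRunEnd_run (labels : List (List Char)) (n : Nat) (tag : List Char) :
    ∀ fuel j k, j ≤ k → k < pvRunEnd labels n tag fuel j → labels.getD k [] = tag := by
  intro fuel
  induction fuel with
  | zero => intro j k h1 h2; simp [pvRunEnd] at h2; omega
  | succ f ih =>
    intro j k h1 h2
    simp only [pvRunEnd] at h2
    split at h2
    · next hc =>
      rcases Nat.eq_or_lt_of_le h1 with rfl | hlt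
      · exact hc.2
      · exact ih (j + 1) k (by omega) h2
    · omega

theorem pvRunEnd_stop (labels : List (List Char)) (n : Nat) (tag : List Char) :
    ∀ fuel j, n ≤ fuel + j → pvRunEnd labels n tag fuel j < n →
      labels.getD (pvRunEnd labels n tag fuel j) [] ≠ tag := by
  intro fuel
  induction fuel with
  | zero => intro j h1 h2; simp [pvRunEnd] at h2 ⊢; omega
  | succ f ih =>
    intro j h1 h2
    simp only [pvRunEnd] at h2 ⊢
    split at h2
    · next hc => rw [if_pos hc]; exact ih (j + 1) (by omega) h2
    · next hc =>
      rw [if_neg hc]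
      intro heq
      exact hc ⟨h2, heq⟩

-- A's loop body with the index already a Nat
def pvStep (words labels : List (List Char)) (st : Option (List Char) × List Char) (k : Nat) :
    Option (List Char) × List Char :=
  let ti := labels.getD k []
  if some ti ≠ st.1 then
    let m1 := if (match st.1 with
                  | some p => decide (p ≠ []) && decide (p ≠ ['O'])
                  | none => false) then st.2 ++ "</mark>".toList else st.2
    (some ti,
      if ti ≠ ['O'] then
        m1 ++ " <mark data-entity=\"".toList ++ ti ++ "\">".toList ++ words.getD k []
      else m1 ++ ' ' :: words.getD k [])
  else (st.1, st.2 ++ ' ' :: words.getD k [])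

def pvClose (t : List Char) : List Char := if t = ['O'] then [] else "</mark>".toList
def pvCloseO : Option (List Char) → List Char
  | none => []
  | some p => pvClose p
def pvHead (t w : List Char) : List Char :=
  if t = ['O'] then ' ' :: w else " <mark data-entity=\"".toList ++ t ++ "\">".toList ++ w
def pvFin (st : Option (List Char) × List Char) : List Char :=
  if st.1 ≠ some ['O'] then st.2 ++ "</mark>".toList else st.2


theorem pvJoinNil : ∀ l : List (List Char), PySem.Chars.join [] l = l.flatten
  | [] => by simp [PySem.Chars.join_nil]
  | [x] => by simp [PySem.Chars.join_singleton]
  | x :: y :: r => by rw [PySem.Chars.join_cons_cons, pvJoinNil (y :: r)]; simp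

theorem pvJoinSpace (x : List Char) : ∀ xs : List (List Char),
    PySem.Chars.join [' '] (x :: xs) = x ++ (xs.map (' ' :: ·)).flatten := by
  intro xs
  induction xs generalizing x with
  | nil => simp [PySem.Chars.join_singleton]
  | cons y r ih => rw [PySem.Chars.join_cons_cons, ih y]; simp

theorem pvSliceMap (xs : List (List Char)) (a b : Nat) (hab : a ≤ b) (hb : b ≤ xs.length) :
    (xs.drop a).take (b - a) = (List.range' a (b - a)).map (fun k => xs.getD k []) := by
  apply List.ext_getElem
  · simp; omega
  · intro i h1 h2
    simp only [List.getElem_take, List.getElem_drop, List.getElem_map, List.getElem_range']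
    simp at h2
    rw [List.getD_eq_getElem _ _ (by omega)]
    congr 1; omega

theorem pvRangeCons (a b : Nat) (h : a < b) :
    List.range' a (b - a) = a :: List.range' (a + 1) (b - (a + 1)) := by
  have : b - a = (b - (a + 1)) + 1 := by omega
  rw [this, List.range'_succ]

theorem pvRangeSplit (a b c : Nat) (h1 : a ≤ b) (h2 : b ≤ c) :
    List.range' a (c - a) = List.range' a (b - a) ++ List.range' b (c - b) := by
  have h := @List.range'_append a (b - a) (c - b) 1
  rw [show a + 1 * (b - a) = b by omega, show (b - a) + (c - b) = c - a by omega] at h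
  exact h.symm


theorem pvRunFold (words labels : List (List Char)) (t : List Char) :
    ∀ (len a : Nat) (M : List Char), (∀ k, a ≤ k → k < a + len → labels.getD k [] = t) →
    (List.range' a len).foldl (pvStep words labels) (some t, M)
      = (some t, M ++ ((List.range' a len).map (fun k => ' ' :: words.getD k [])).flatten) := by
  intro len
  induction len with
  | zero => intro a M h; simp
  | succ l ih =>
    intro a M h
    rw [List.range'_succ]
    simp only [List.foldl_cons, List.map_cons, List.flatten_cons]
    have ha : labels.getD a [] = t := h a (le_refl a) (by omega)
    have hstep : pvStep words labels (some t, M) a = (some t, M ++ ' ' :: words.getD a []) := by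
      simp only [pvStep]
      rw [ha]
      simp
    rw [hstep, ih (a + 1) _ (fun k hk1 hk2 => h k (by omega) (by omega))]
    simp

theorem pvMain (words labels : List (List Char)) (n : Nat) (hn : n = words.length)
    (hl : n ≤ labels.length) (htok : ∀ x ∈ labels, x ≠ []) :
    ∀ (fuel i : Nat) (prev : Option (List Char)) (m : List Char),
    n ≤ fuel + i → i ≤ n →
    (prev = none → i < n) →
    (∀ p, prev = some p → p ≠ [] ∧ (i < n → labels.getD i [] ≠ p)) →
    pvFin ((List.range' i (n - i)).foldl (pvStep words labels) (prev, m))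
      = m ++ pvCloseO prev ++ PySem.Chars.join [] (pvRender words labels n fuel i) := by
  intro fuel
  induction fuel with
  | zero =>
    intro i prev m hf hi hp0 hps
    have hieq : i = n := by omega
    subst hieq
    cases prev with
    | none => exact absurd (hp0 rfl) (by omega)
    | some p =>
      obtain ⟨hpne, -⟩ := hps p rfl
      simp only [Nat.sub_self, List.range'_zero, List.foldl_nil, pvRender,
        pvFin, pvCloseO, pvClose]
      by_cases hpo : p = ['O'] <;> simp [hpo, PySem.Chars.join_nil]
  | succ f ih =>
    intro i prev m hf hi hp0 hps
    by_cases hin : i < n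
    case neg =>
      have hieq : i = n := by omega
      subst hieq
      have hnn : ¬ i < i := by omega
      cases prev with
      | none => exact absurd (hp0 rfl) (by omega)
      | some p =>
        obtain ⟨hpne, -⟩ := hps p rfl
        simp only [Nat.sub_self, List.range'_zero, List.foldl_nil, pvRender,
          if_neg hnn, pvFin, pvCloseO, pvClose]
        by_cases hpo : p = ['O'] <;> simp [hpo, PySem.Chars.join_nil]
    case pos =>
      obtain ⟨t, ht⟩ : ∃ t, labels.getD i [] = t := ⟨_, rfl⟩
      obtain ⟨j, hj⟩ : ∃ j, pvRunEnd labels n t n (i + 1) = j := ⟨_, rfl⟩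
      obtain ⟨w, hw⟩ : ∃ w, words.getD i [] = w := ⟨_, rfl⟩
      have hj1 : i + 1 ≤ j := by rw [← hj]; exact pvRunEnd_ge labels n t n (i + 1)
      have hj2 : j ≤ n := by rw [← hj]; exact pvRunEnd_le labels n t n (i + 1) (by omega)
      have hrun : ∀ k, i + 1 ≤ k → k < j → labels.getD k [] = t := fun k h1 h2 =>
        pvRunEnd_run labels n t n (i + 1) k h1 (by rw [hj]; exact h2)
      have hstop : j < n → labels.getD j [] ≠ t := by
        rw [← hj]; exact fun h => pvRunEnd_stop labels n t n (i + 1) (by omega) h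
      have htne : t ≠ [] := htok _ (by
        rw [← ht, List.getD_eq_getElem _ _ (by omega)]; exact List.getElem_mem _)
      rw [pvRangeSplit i j n (by omega) hj2, pvRangeCons i j (by omega),
        List.foldl_append, List.foldl_cons]
      have hstep1 : pvStep words labels (prev, m) i
          = (some t, (m ++ pvCloseO prev) ++ pvHead t w) := by
        cases prev with
        | none =>
          simp only [pvStep, ht, hw, pvCloseO, pvHead]
          by_cases h : t = ['O'] <;> simp [h]
        | some p =>
          obtain ⟨hpne, hpt⟩ := hps p rfl
          have hne : t ≠ p := by rw [← ht]; exact hpt hin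
          simp only [pvStep, ht, hw, pvCloseO, pvClose, pvHead]
          by_cases hpo : p = ['O'] <;> by_cases h : t = ['O']
          · exact absurd (h.trans hpo.symm) hne
          · simp [h, hpo]
          · simp [h, hpo, hpne]
            exact fun hh => hne (h.trans hh)
          · simp [h, hpo, hpne, hne]
      rw [hstep1]
      rw [pvRunFold words labels t (j - (i + 1)) (i + 1) _
        (fun k hk1 hk2 => hrun k hk1 (by omega))]
      rw [ih j (some t) _ (by omega) hj2 (by simp)
        (fun p hp => by
          injection hp with hp; subst hp
          exact ⟨htne, fun h => hstop h⟩)]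
      conv_rhs => rw [pvRender]
      rw [if_pos hin]
      simp only [ht, hj]
      have htext : PySem.Chars.join [' ']
          (PySem.List.slice words (some (i : Int)) (some (j : Int)))
          = w ++ ((List.range' (i + 1) (j - (i + 1))).map
              (fun k => ' ' :: words.getD k [])).flatten := by
        rw [PySem.List.slice_natCast, pvSliceMap words i j (by omega) (by omega),
          pvRangeCons i j (by omega), List.map_cons, pvJoinSpace, List.map_map, hw]
        rfl
      rw [htext]
      simp only [pvJoinNil, List.flatten_cons, pvCloseO, pvHead, pvClose]
      by_cases h : t = ['O'] <;> simp [h]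

theorem pvFoldEq (words labels : List (List Char)) (st0 : Option (List Char) × List Char) :
    (PySem.List.pyRange 0 (words.length : Int) 1).foldl
      (fun (st : Option (List Char) × List Char) i =>
        let ti := PySem.List.pyGetD labels i []
        if some ti ≠ st.1 then
          let m1 := if (match st.1 with
                        | some p => decide (p ≠ []) && decide (p ≠ ['O'])
                        | none => false) then st.2 ++ "</mark>".toList else st.2
          (some ti,
            if ti ≠ ['O'] then
              m1 ++ " <mark data-entity=\"".toList ++ ti ++ "\">".toList ++ PySem.List.pyGetD words i []
            else m1 ++ ' ' :: PySem.List.pyGetD words i [])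
        else (st.1, st.2 ++ ' ' :: PySem.List.pyGetD words i [])) st0
    = (List.range' 0 words.length).foldl (pvStep words labels) st0 := by
  rw [PySem.List.pyRange_zero_nat, List.foldl_map, List.range_eq_range']
  congr 1
  funext st k
  simp only [pvStep, PySem.List.pyGetD_natCast]


-- ===== VERDICT (by name: the statement is the Claim_ definition above) =====
theorem get_markup_spec : Claim_unchanged_get_markup := by
  intro sent tags hdom hpre hnd
  have hpre' : (PySem.Chars.split₀ sent.toList).length ≤ (PySem.Chars.split₀ tags.toList).length := hpre
  have hnd' : ¬ PySem.Chars.split₀ sent.toList = [] := hnd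
  have hpos : 0 < (PySem.Chars.split₀ sent.toList).length := List.length_pos_of_ne_nil hnd'
  have hmain := pvMain (PySem.Chars.split₀ sent.toList) (PySem.Chars.split₀ tags.toList)
    (PySem.Chars.split₀ sent.toList).length rfl hpre' (pv_split₀_ne_nil _)
    (PySem.Chars.split₀ sent.toList).length 0 none [] (by omega) (by omega)
    (fun _ => hpos) (fun p hp => by cases hp)
  simp only [Nat.sub_zero, pvFin, pvCloseO, List.nil_append] at hmain
  show get_markup sent tags = get_markup_alt sent tags
  simp only [get_markup, get_markup_alt]
  rw [pvFoldEq, hmain]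

theorem get_markup_changed : Claim_changed_get_markup := by
  unfold Claim_changed_get_markup; decide

theorem get_markup_tight : Claim_exact_get_markup := by
  intro sent tags hdom hpre hD
  have hD' : PySem.Chars.split₀ sent.toList = [] := hD
  simp only [get_markup, get_markup_alt, hD']
  simp [pvRender]
  decide
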